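-- pv_equiv track=rewrite | github.com/pypi-data/pypi-mirror-402 | packages/invarlock/invarlock-0.3.7-py3-none-any.whl/invarlock/edits/_edit_utils.py | create_layer_mask
-- ===== SOURCE A (Python) =====
-- def create_layer_mask(
--     n_layers: int, layers_to_edit: list[int] | None = None
-- ) -> list[bool]:
--     """
--     Create a boolean mask for layers to edit.
--
--     Args:
--         n_layers: Total number of layers
--         layers_to_edit: List of layer indices to edit (None = all layers)
--
--     Returns:
--         Boolean mask where True indicates layer should be edited
--     """
--     if layers_to_edit is None:
--         return [True] * n_layers
--
--     mask = [False] * n_layers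
--     for layer_idx in layers_to_edit:
--         if 0 <= layer_idx < n_layers:
--             mask[layer_idx] = True
--
--     return mask
-- ===== SOURCE B (Python) =====
-- def create_layer_mask(n_layers, layers_to_edit=None):
--     if layers_to_edit is None:
--         return [True] * n_layers
--     edit = set(layers_to_edit)
--     return [i in edit for i in range(n_layers)]
-- ===== Notes on version B (the rewrite author's own statement) =====
-- stated objective: idiomatic
-- what changed: Instead of preallocating a False mask and scattering True into it by index while scanning layers_to_edit, B scans range(n_layers) once and tests each position for membership in a set built from layers_to_edit; out-of-range indices are excluded implicitly rather than by an explicit bounds check.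
import Mathlib
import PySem

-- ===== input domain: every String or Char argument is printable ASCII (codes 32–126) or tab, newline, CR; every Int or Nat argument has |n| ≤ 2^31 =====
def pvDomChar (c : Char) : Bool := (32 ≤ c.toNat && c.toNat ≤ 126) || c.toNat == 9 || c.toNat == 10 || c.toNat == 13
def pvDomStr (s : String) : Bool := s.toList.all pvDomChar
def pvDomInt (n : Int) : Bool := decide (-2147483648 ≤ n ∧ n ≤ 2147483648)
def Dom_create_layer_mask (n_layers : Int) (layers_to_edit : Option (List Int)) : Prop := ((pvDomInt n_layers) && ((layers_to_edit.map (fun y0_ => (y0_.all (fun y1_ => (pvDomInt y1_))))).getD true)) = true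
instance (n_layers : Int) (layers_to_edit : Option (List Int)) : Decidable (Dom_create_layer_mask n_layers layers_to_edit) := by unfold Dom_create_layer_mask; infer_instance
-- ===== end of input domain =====

-- B replaces A's scatter-by-index loop (preallocated False mask mutated at each in-range index)
-- by a single scan of range(n_layers) testing membership in a set built from layers_to_edit (idiomatic).

-- ===== PORT A =====
def create_layer_mask (n_layers : Int) (layers_to_edit : Option (List Int)) : List Bool :=
  match layers_to_edit with
  | none => List.replicate n_layers.toNat true
  | some L =>
    L.foldl
      (fun mask layer_idx =>
        if 0 ≤ layer_idx ∧ layer_idx < n_layers then mask.set layer_idx.toNat true else mask)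
      (List.replicate n_layers.toNat false)

-- ===== PORT B =====
def create_layer_mask_alt (n_layers : Int) (layers_to_edit : Option (List Int)) : List Bool :=
  match layers_to_edit with
  | none => List.replicate n_layers.toNat true
  | some L =>
    let edit : PySem.Set Int := PySem.Set.ofList L
    (PySem.List.pyRange 0 n_layers 1).map (fun i => PySem.Set.contains edit i)

-- ===== PRECONDITION & SPEC =====
def Spec_create_layer_mask (n_layers : Int) (layers_to_edit : Option (List Int)) (out : List Bool) : Prop := out = create_layer_mask_alt n_layers layers_to_edit
instance (n_layers : Int) (layers_to_edit : Option (List Int)) (out : List Bool) : Decidable (Spec_create_layer_mask n_layers layers_to_edit out) := by unfold Spec_create_layer_mask; infer_instance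

-- ===== CLAIM (what is proved, stated in full; the proofs are below) =====
def Claim_equal_create_layer_mask : Prop := ∀ (n_layers : Int) (layers_to_edit : Option (List Int)), Dom_create_layer_mask n_layers layers_to_edit → Spec_create_layer_mask n_layers layers_to_edit (create_layer_mask n_layers layers_to_edit)

-- ===== LEMMAS AND PROOFS =====

-- A's loop preserves the mask length.
theorem clm_fold_length (n : Int) (L : List Int) (mask : List Bool) :
    (L.foldl
      (fun mask layer_idx =>
        if 0 ≤ layer_idx ∧ layer_idx < n then mask.set layer_idx.toNat true else mask)
      mask).length = mask.length := by
  induction L generalizing mask with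
  | nil => rfl
  | cons x L ih =>
    simp only [List.foldl_cons]
    split_ifs <;> simp [ih]

-- Element-wise characterisation of A's loop on a mask of length n.toNat.
theorem clm_fold_get (n : Int) (L : List Int) (mask : List Bool)
    (hlen : mask.length = n.toNat) (i : Nat) (hi : i < mask.length) :
    (L.foldl
      (fun mask layer_idx =>
        if 0 ≤ layer_idx ∧ layer_idx < n then mask.set layer_idx.toNat true else mask)
      mask)[i]'(by rw [clm_fold_length]; exact hi)
    = (mask[i] || decide ((i : Int) ∈ L)) := by
  induction L generalizing mask with
  | nil => simp
  | cons x L ih =>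
    simp only [List.foldl_cons]
    by_cases hx : 0 ≤ x ∧ x < n
    · simp only [if_pos hx]
      have hset : (mask.set x.toNat true).length = n.toNat := by simpa using hlen
      rw [ih (mask.set x.toNat true) hset (by simpa using hi)]
      by_cases hxi : x = (i : Int)
      · have ht : x.toNat = i := by omega
        have hxi' : (i : Int) = x := hxi.symm
        simp [ht, hxi']
      · have hne : x.toNat ≠ i := by omega
        have hxi' : ¬ ((i : Int) = x) := fun h => hxi h.symm
        simp [hne, List.mem_cons, hxi']
    · simp only [if_neg hx]
      rw [ih mask hlen hi]
      have hin : i < n.toNat := hlen ▸ hi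
      have hxi : ¬ ((i : Int) = x) := by omega
      simp [List.mem_cons, hxi]

theorem create_layer_mask_eq (n_layers : Int) (layers_to_edit : Option (List Int)) :
    create_layer_mask n_layers layers_to_edit = create_layer_mask_alt n_layers layers_to_edit := by
  cases layers_to_edit with
  | none => rfl
  | some L =>
    unfold create_layer_mask create_layer_mask_alt
    apply List.ext_getElem
    · rw [clm_fold_length]
      simp [PySem.List.length_pyRange_one]
    · intro i h1 h2
      have hi : i < (List.replicate n_layers.toNat (false : Bool)).length := by
        have := h1; rwa [clm_fold_length] at this
      rw [clm_fold_get n_layers L _ (by simp) i hi]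
      have hin : i < n_layers.toNat := by simpa using hi
      have hgt : (i : Int) < n_layers := by omega
      simp only [List.getElem_map]
      rw [PySem.List.getElem_pyRange_one]
      simp [PySem.Set.contains_eq_listContains, PySem.Set.mem_ofList]

-- ===== VERDICT (by name: the statement is the Claim_ definition above) =====
theorem create_layer_mask_spec : Claim_equal_create_layer_mask := by
  intro n L _
  exact create_layer_mask_eq n L
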